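-- pv_equiv track=rewrite | github.com/murbar/code-challenges | map-traverse/solution.py | find_directional_path_through_rooms
-- ===== SOURCE A (Python) =====
-- def find_directional_path_through_rooms(world_map, room_sequence):
--     directions = []
--     # skip the destination
--     for i in range(len(room_sequence) - 1):
--         cur, nxt = room_sequence[i], room_sequence[i+1]
--         exits = world_map[cur]
--         for d, rm in exits.items():
--             if rm == nxt:
--                 directions.append(d)
--     return directions
-- ===== SOURCE B (Python) =====
-- def find_directional_path_through_rooms(world_map, room_sequence):
--     # Build an inverted index once: room -> {target_room: [directions...]}
--     index = {}
--     for room, exits in world_map.items():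
--         inv = {}
--         for d, rm in exits.items():
--             inv.setdefault(rm, []).append(d)
--         index[room] = inv
--     directions = []
--     for cur, nxt in zip(room_sequence, room_sequence[1:]):
--         directions.extend(index[cur].get(nxt, []))
--     return directions
-- ===== Notes on version B (the rewrite author's own statement) =====
-- stated objective: faster
-- what changed: Instead of rescanning a room's exits for every consecutive pair, B builds an inverted index (room -> target -> list of directions) in one pass over world_map and then answers each pair with a single dict lookup.
import Mathlib
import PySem

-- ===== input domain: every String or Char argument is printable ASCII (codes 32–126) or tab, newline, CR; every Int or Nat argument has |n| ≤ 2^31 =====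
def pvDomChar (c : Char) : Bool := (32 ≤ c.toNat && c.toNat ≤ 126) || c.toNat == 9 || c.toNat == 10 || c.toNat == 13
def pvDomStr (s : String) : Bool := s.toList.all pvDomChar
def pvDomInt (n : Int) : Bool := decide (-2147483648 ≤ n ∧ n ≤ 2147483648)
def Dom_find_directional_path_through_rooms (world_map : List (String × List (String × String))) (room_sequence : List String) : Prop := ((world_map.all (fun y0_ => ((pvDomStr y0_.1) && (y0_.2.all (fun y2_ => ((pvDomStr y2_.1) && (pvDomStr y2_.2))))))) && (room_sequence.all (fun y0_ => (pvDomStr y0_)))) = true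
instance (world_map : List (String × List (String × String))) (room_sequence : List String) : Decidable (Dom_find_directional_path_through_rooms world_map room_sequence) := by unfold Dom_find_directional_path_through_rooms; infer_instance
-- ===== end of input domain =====

-- B builds an inverted index (room -> target -> directions) in one pass over world_map,
-- then answers each consecutive pair with a dict lookup instead of rescanning that room's exits.

-- ===== PORT A =====
def find_directional_path_through_rooms (world_map : List (String × List (String × String))) (room_sequence : List String) : List String :=
  let wmd := PySem.Dict.ofList world_map
  (PySem.List.pyRange 0 ((room_sequence.length : Int) - 1) 1).foldl
    (fun directions i =>
      let cur := (PySem.List.pyGet? room_sequence i).getD ""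
      let nxt := (PySem.List.pyGet? room_sequence (i + 1)).getD ""
      -- world_map[cur]: Pre_ guarantees the key is present (Python raises KeyError otherwise)
      let exits := (wmd.get? cur).getD []
      (PySem.Dict.ofList exits).items.foldl
        (fun ds q => if q.2 == nxt then ds ++ [q.1] else ds) directions)
    []

-- ===== PORT B =====
def find_directional_path_through_rooms_alt (world_map : List (String × List (String × String))) (room_sequence : List String) : List String :=
  let index := (PySem.Dict.ofList world_map).items.foldl
    (fun idx p =>
      idx.insert p.1
        ((PySem.Dict.ofList p.2).items.foldl
          (fun inv q => inv.modify q.2 [] (· ++ [q.1])) PySem.Dict.empty))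
    PySem.Dict.empty
  (room_sequence.zip (room_sequence.drop 1)).foldl
    (fun ds p =>
      -- index[cur]: Pre_ guarantees the key is present (Python raises KeyError otherwise)
      ds ++ (((index.get? p.1).getD PySem.Dict.empty).getD p.2 []))
    []

-- ===== PRECONDITION & SPEC =====
-- Pre_ excludes exactly the inputs where the Python A raises KeyError: some room that is
-- stepped FROM (an element of room_sequence other than the last) is missing from world_map.
def Pre_find_directional_path_through_rooms (world_map : List (String × List (String × String))) (room_sequence : List String) : Prop :=
  ∀ r ∈ room_sequence.dropLast, r ∈ world_map.map Prod.fst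
instance (world_map : List (String × List (String × String))) (room_sequence : List String) : Decidable (Pre_find_directional_path_through_rooms world_map room_sequence) := by unfold Pre_find_directional_path_through_rooms; infer_instance

def pvWitness_find_directional_path_through_rooms : (List (String × List (String × String))) × List String :=
  ([("hall", [("n", "kitchen"), ("e", "den")]), ("kitchen", [("s", "hall")])], ["hall", "kitchen", "hall"])

def Spec_find_directional_path_through_rooms (world_map : List (String × List (String × String))) (room_sequence : List String) (out : List String) : Prop := out = find_directional_path_through_rooms_alt world_map room_sequence
instance (world_map : List (String × List (String × String))) (room_sequence : List String) (out : List String) : Decidable (Spec_find_directional_path_through_rooms world_map room_sequence out) := by unfold Spec_find_directional_path_through_rooms; infer_instance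

-- ===== CLAIM (what is proved, stated in full; the proofs are below) =====
def Claim_equal_find_directional_path_through_rooms : Prop := ∀ (world_map : List (String × List (String × String))) (room_sequence : List String), Dom_find_directional_path_through_rooms world_map room_sequence → Pre_find_directional_path_through_rooms world_map room_sequence → Spec_find_directional_path_through_rooms world_map room_sequence (find_directional_path_through_rooms world_map room_sequence)

-- ===== LEMMAS AND PROOFS =====

-- B's inner accumulation loop: the inverted exit dict of one room
def pvInvRaw (exits : List (String × String)) : PySem.Dict String (List String) :=
  (PySem.Dict.ofList exits).items.foldl (fun inv q => inv.modify q.2 [] (· ++ [q.1])) PySem.Dict.empty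

-- A's contribution for one consecutive pair (cur, nxt)
def pvOut (wmd : PySem.Dict String (List (String × String))) (cur nxt : String) : List String :=
  ((PySem.Dict.ofList ((wmd.get? cur).getD [])).items.filter (fun q => q.2 == nxt)).map Prod.fst

-- B's index as a named function of world_map
def pvIndex (wm : List (String × List (String × String))) :
    PySem.Dict String (PySem.Dict String (List String)) :=
  (PySem.Dict.ofList wm).items.foldl
    (fun idx p => idx.insert p.1 (pvInvRaw p.2)) PySem.Dict.empty

lemma pvInv_getD (exits : List (String × String)) (nxt : String) :
    (pvInvRaw exits).getD nxt []
      = ((PySem.Dict.ofList exits).items.filter (fun q => q.2 == nxt)).map Prod.fst := by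
  unfold pvInvRaw
  have h : (PySem.Dict.ofList exits).items.foldl
      (fun inv q => inv.modify q.2 [] (· ++ [q.1])) (PySem.Dict.empty : PySem.Dict String (List String))
      = ((PySem.Dict.ofList exits).items.map Prod.swap).foldl
        (fun d p => d.modify p.1 [] (· ++ [p.2])) PySem.Dict.empty := by
    rw [List.foldl_map]
    rfl
  rw [h, PySem.Dict.getD_foldl_modify_append]
  simp [List.filter_map, List.map_map, Function.comp_def]

lemma pvZipMem {α : Type} {rs : List α} {p : α × α} (h : p ∈ rs.zip (rs.drop 1)) :
    p.1 ∈ rs.dropLast := by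
  rcases List.mem_iff_getElem.mp h with ⟨i, hi, hp⟩
  have hlen : i < rs.length - 1 := by
    have := hi
    simp [List.length_zip] at this
    omega
  have : p.1 = rs[i]'(by omega) := by
    subst hp; simp
  rw [this]
  exact List.mem_iff_getElem.mpr ⟨i, by simpa using hlen, by simp⟩

lemma pvIndex_items (wm : List (String × List (String × String))) :
    (pvIndex wm).items = (PySem.Dict.ofList wm).items.map (fun p => (p.1, pvInvRaw p.2)) := by
  unfold pvIndex
  rw [PySem.Dict.items_foldl_insert_fresh _ Prod.fst (fun p => pvInvRaw p.2) _ (by intro a _; rfl)]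
  · rfl
  · have := PySem.Dict.nodup_keys_ofList wm
    simpa [PySem.Dict.keys] using this

lemma pvIndex_get? (wm : List (String × List (String × String))) {cur : String}
    {exits : List (String × String)} (h : (PySem.Dict.ofList wm).get? cur = some exits) :
    (pvIndex wm).get? cur = some (pvInvRaw exits) := by
  apply PySem.Dict.get?_of_mem_items
  · rw [pvIndex_items]
    exact List.mem_map_of_mem (PySem.Dict.mem_items_of_get?_eq_some _ h)
  · unfold pvIndex
    exact PySem.Dict.nodup_keys_foldl_insert_key _ _ _ _ (by show (List.map _ ([] : List (String × PySem.Dict String (List String)))).Nodup; simp)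

lemma pvKeys_isSome (wm : List (String × List (String × String))) {cur : String}
    (h : cur ∈ wm.map Prod.fst) : ((PySem.Dict.ofList wm).get? cur).isSome := by
  have hk : (PySem.Dict.ofList wm).keys = PySem.Set.ofList (wm.map Prod.fst) := by
    have : (PySem.Dict.ofList wm) = wm.foldl (fun d p => d.insert p.1 p.2) PySem.Dict.empty := rfl
    rw [this, PySem.Dict.keys_foldl_insert_key wm Prod.fst (fun d p => p.2)]
    show PySem.Set.update (List.map _ ([] : List (String × List (String × String)))) _ = _
    simp [PySem.Set.update_nil_left]
  by_contra hc
  have : (PySem.Dict.ofList wm).get? cur = none := by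
    cases hh : (PySem.Dict.ofList wm).get? cur <;> simp [hh] at hc ⊢
  have := (PySem.Dict.get?_eq_none_iff_not_mem_keys _ _).mp this
  rw [hk] at this
  exact this ((PySem.Set.mem_ofList _ _).mpr h)

lemma pvRange_zip {β : Type} (rs : List String) (f : String → String → List β) :
    List.flatMap (fun i => f ((PySem.List.pyGet? rs i).getD "") ((PySem.List.pyGet? rs (i + 1)).getD ""))
        (PySem.List.pyRange 0 ((rs.length : Int) - 1) 1)
      = List.flatMap (fun p => f p.1 p.2) (rs.zip (rs.drop 1)) := by
  cases rs with
  | nil => rfl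
  | cons a t =>
    have h1 : (((a :: t).length : Int) - 1) = (t.length : Int) := by simp
    rw [h1, PySem.List.pyRange_zero_natCast, List.flatMap_map]
    have h2 : ∀ k : Nat, ((k : Int) + 1) = ((k + 1 : Nat) : Int) := by intro k; push_cast; ring
    have hm : (List.range t.length).map
        (fun k : Nat => f ((PySem.List.pyGet? (a :: t) k).getD "") ((PySem.List.pyGet? (a :: t) ((k : Int) + 1)).getD ""))
        = ((a :: t).zip ((a :: t).drop 1)).map (fun p => f p.1 p.2) := by
      apply List.ext_getElem
      · simp
      · intro i h1' h2'
        have hi : i < t.length := by simpa using h1'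
        simp only [List.getElem_map, List.getElem_range, h2, PySem.List.pyGet?_natCast,
          List.drop_one, List.getElem_zip, List.tail_cons]
        rw [List.getElem?_eq_getElem (by simpa using Nat.lt_succ_of_lt hi),
            List.getElem?_eq_getElem (by simpa using hi)]
        simp
    rw [List.flatMap_def, List.flatMap_def, hm]

lemma pvA_flat (wm : List (String × List (String × String))) (rs : List String) :
    find_directional_path_through_rooms wm rs
      = List.flatMap (fun p => pvOut (PySem.Dict.ofList wm) p.1 p.2) (rs.zip (rs.drop 1)) := by
  unfold find_directional_path_through_rooms
  simp only [PySem.List.foldl_append_if]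
  rw [PySem.List.foldl_append_eq_flatMap]
  simpa [pvOut] using pvRange_zip rs (fun cur nxt =>
    ((PySem.Dict.ofList (((PySem.Dict.ofList wm).get? cur).getD [])).items.filter
      (fun q => q.2 == nxt)).map (fun q => q.1))

lemma pvB_flat (wm : List (String × List (String × String))) (rs : List String) :
    find_directional_path_through_rooms_alt wm rs
      = List.flatMap
        (fun p => (((pvIndex wm).get? p.1).getD PySem.Dict.empty).getD p.2 []) (rs.zip (rs.drop 1)) := by
  unfold find_directional_path_through_rooms_alt
  rw [PySem.List.foldl_append_eq_flatMap]
  rfl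

-- ===== VERDICT (by name: the statement is the Claim_ definition above) =====
theorem find_directional_path_through_rooms_spec : Claim_equal_find_directional_path_through_rooms := by
  intro wm rs _ hpre
  unfold Spec_find_directional_path_through_rooms
  rw [pvA_flat, pvB_flat]
  apply List.flatMap_congr
  intro p hp
  have hmem := hpre p.1 (pvZipMem hp)
  obtain ⟨exits, hex⟩ := Option.isSome_iff_exists.mp (pvKeys_isSome wm hmem)
  rw [pvIndex_get? wm hex]
  simp only [Option.getD_some]
  rw [pvInv_getD]
  simp [pvOut, hex]
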